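-- pv_equiv track=rewrite | github.com/zl3466/thinking_in_street | generate_dataset/street_layout.py | create_initial_path
-- ===== SOURCE A (Python) =====
-- def create_initial_path(movements, initial_heading):
--     """Create path coordinates based on movement information."""
--     # Convert initial heading to closest cardinal direction
--     # North: 0/360, East: 90, South: 180, West: 270
--     cardinal_directions = {
--         0: 0,      # North
--         90: 90,    # East
--         180: 180,  # South
--         270: 270   # West
--     }
--
--     # Find the closest cardinal direction to the initial heading
--     initial_direction = min(cardinal_directions.values(),
--                           key=lambda x: min(abs(initial_heading - x),
--                                           abs(initial_heading - (x + 360))))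
--
--     # Start at (0, 0) with the initial direction
--     current_pos = [0, 0]
--     current_direction = initial_direction
--     path = [current_pos.copy()]
--
--     # Movement vectors for each direction
--     direction_vectors = {
--         0: [0, 1],    # north
--         90: [1, 0],   # east
--         180: [0, -1], # south
--         270: [-1, 0]  # west
--     }
--
--     # Track turn sequence
--     turning = False
--     turn_type = None
--
--     for i, movement in enumerate(movements):
--         if movement in ["left", "right"]:
--             # Start of a new turn sequence
--             if not turning:
--                 turning = True
--                 turn_type = movement
--             # Skip additional turn frames of the same type
--             continue
--         else:  # movement == "forward"
--             # If we were turning, complete the turn before moving forward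
--             if turning:
--                 if turn_type == "right":
--                     current_direction = (current_direction + 90) % 360
--                 else:  # left turn
--                     current_direction = (current_direction - 90) % 360
--                 turning = False
--                 turn_type = None
--
--         # Move forward in current direction
--         move_vector = direction_vectors[current_direction]
--         current_pos[0] += move_vector[0]
--         current_pos[1] += move_vector[1]
--         path.append(current_pos.copy())
--
--     return path
-- ===== SOURCE B (Python) =====
-- def create_initial_path(movements, initial_heading):
--     """Create path coordinates based on movement information (two-pass version)."""
--     # Snap initial heading to closest cardinal direction (same min/key tie-breaking)
--     initial_direction = min([0, 90, 180, 270],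
--                             key=lambda x: min(abs(initial_heading - x),
--                                               abs(initial_heading - (x + 360))))
--
--     # Pass 1: turn the movement sequence into one unit vector per forward step.
--     vectors = []
--     direction = initial_direction
--     pending_turn = None
--     for movement in movements:
--         if movement in ("left", "right"):
--             if pending_turn is None:
--                 pending_turn = movement
--         else:
--             if pending_turn is not None:
--                 direction = (direction + 90) % 360 if pending_turn == "right" else (direction - 90) % 360
--                 pending_turn = None
--             if direction == 0:
--                 vectors.append((0, 1))
--             elif direction == 90:
--                 vectors.append((1, 0))
--             elif direction == 180:
--                 vectors.append((0, -1))
--             else: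
--                 vectors.append((-1, 0))
--
--     # Pass 2: prefix-sum the vectors starting from [0, 0].
--     path = [[0, 0]]
--     for dx, dy in vectors:
--         last = path[-1]
--         path.append([last[0] + dx, last[1] + dy])
--     return path
-- ===== Notes on version B (the rewrite author's own statement) =====
-- stated objective: alternative
-- what changed: Replaces A's single loop that mutates a position/turn-flag state and appends copies with a two-pass decomposition: one pass compiles the movements into per-forward-step unit vectors (pending-turn option instead of a turning flag + type), then a separate prefix-sum pass builds the path from [0,0].
import Mathlib
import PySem

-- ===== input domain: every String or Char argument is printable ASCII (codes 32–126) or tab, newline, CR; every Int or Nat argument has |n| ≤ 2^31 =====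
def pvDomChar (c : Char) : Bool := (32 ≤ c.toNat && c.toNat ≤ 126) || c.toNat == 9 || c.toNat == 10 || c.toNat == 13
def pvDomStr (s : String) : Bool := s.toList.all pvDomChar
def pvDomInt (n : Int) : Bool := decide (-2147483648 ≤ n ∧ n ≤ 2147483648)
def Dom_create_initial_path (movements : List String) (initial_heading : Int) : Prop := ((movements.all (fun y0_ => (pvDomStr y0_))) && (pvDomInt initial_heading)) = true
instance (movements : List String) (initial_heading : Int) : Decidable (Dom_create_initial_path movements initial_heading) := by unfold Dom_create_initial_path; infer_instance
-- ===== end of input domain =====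

-- B replaces A's single mutating loop by a two-pass decomposition (per-step unit vectors, then a
-- prefix sum from [0,0]); same cost, alternative structure. Equivalence of return values is proved.

-- ===== PORT A =====
-- key of A's min(..., key=lambda x: min(abs(h - x), abs(h - (x + 360))))
def cipKeyA (h x : Int) : Int := min |h - x| |h - (x + 360)|

-- direction_vectors[d]; exact for d ∈ {0, 90, 180, 270}, the only values current_direction takes
def cipVecA (d : Int) : Int × Int :=
  if d = 0 then (0, 1) else if d = 90 then (1, 0) else if d = 180 then (0, -1) else (-1, 0)

-- A's loop: state = (current_pos as x,y; current_direction; turning; turn_type), emitting appended copies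
def cipLoopA : List String → Int → Int → Int → Bool → Option String → List (List Int)
  | [], _, _, _, _, _ => []
  | m :: ms, x, y, d, turning, tt =>
    if m = "left" ∨ m = "right" then
      cipLoopA ms x y d true (if turning then tt else some m)
    else
      let d' := if turning then
          (if tt = some "right" then PySem.Int.mod (d + 90) 360 else PySem.Int.mod (d - 90) 360)
        else d
      let v := cipVecA d'
      [x + v.1, y + v.2] :: cipLoopA ms (x + v.1) (y + v.2) d' false none

def create_initial_path (movements : List String) (initial_heading : Int) : List (List Int) :=
  let initial_direction := (PySem.List.min? [0, 90, 180, 270] (cipKeyA initial_heading)).getD 0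
  [0, 0] :: cipLoopA movements 0 0 initial_direction false none

-- ===== PORT B =====
def cipKeyB (h x : Int) : Int := min |h - x| |h - (x + 360)|

-- pass 1 of B: movements → list of unit vectors, state = (direction, pending_turn)
def cipVectorsB : List String → Int → Option String → List (Int × Int)
  | [], _, _ => []
  | m :: ms, d, pending =>
    if m = "left" ∨ m = "right" then
      cipVectorsB ms d (if pending = none then some m else pending)
    else
      let d' := match pending with
        | some t => if t = "right" then PySem.Int.mod (d + 90) 360 else PySem.Int.mod (d - 90) 360
        | none => d
      (if d' = 0 then (0, 1) else if d' = 90 then (1, 0) else if d' = 180 then (0, -1) else (-1, 0))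
        :: cipVectorsB ms d' none

-- pass 2 of B: prefix sums after the leading [0,0], carrying the last point
def cipPrefixB : List (Int × Int) → Int → Int → List (List Int)
  | [], _, _ => []
  | v :: vs, x, y => [x + v.1, y + v.2] :: cipPrefixB vs (x + v.1) (y + v.2)

def create_initial_path_alt (movements : List String) (initial_heading : Int) : List (List Int) :=
  let initial_direction := (PySem.List.min? [0, 90, 180, 270] (cipKeyB initial_heading)).getD 0
  [0, 0] :: cipPrefixB (cipVectorsB movements initial_direction none) 0 0

-- ===== PRECONDITION & SPEC =====
def Spec_create_initial_path (movements : List String) (initial_heading : Int) (out : List (List Int)) : Prop := out = create_initial_path_alt movements initial_heading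
instance (movements : List String) (initial_heading : Int) (out : List (List Int)) : Decidable (Spec_create_initial_path movements initial_heading out) := by unfold Spec_create_initial_path; infer_instance

-- ===== CLAIM (what is proved, stated in full; the proofs are below) =====
def Claim_equal_create_initial_path : Prop := ∀ (movements : List String) (initial_heading : Int), Dom_create_initial_path movements initial_heading → Spec_create_initial_path movements initial_heading (create_initial_path movements initial_heading)

-- ===== LEMMAS AND PROOFS =====

-- A's loop with state (turning = p.isSome, turn_type = p) equals B's prefix sum of B's vectors.
theorem cipLoopA_eq (ms : List String) : ∀ (x y d : Int) (p : Option String),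
    cipLoopA ms x y d p.isSome p = cipPrefixB (cipVectorsB ms d p) x y := by
  induction ms with
  | nil => intro x y d p; rfl
  | cons m ms ih =>
    intro x y d p
    by_cases hm : m = "left" ∨ m = "right"
    · simp only [cipLoopA, cipVectorsB, if_pos hm]
      cases p with
      | none => simpa using ih x y d (some m)
      | some t => simpa using ih x y d (some t)
    · simp only [cipLoopA, cipVectorsB, if_neg hm]
      cases p with
      | none =>
        simp only [Option.isSome_none, Bool.false_eq_true, if_false, cipVecA, cipPrefixB]
        exact congrArg _ (ih _ _ d none)
      | some t =>
        simp only [Option.isSome_some, if_true, cipVecA, cipPrefixB, Option.some.injEq]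
        by_cases ht : t = "right"
        · simp only [ht, reduceIte]
          exact congrArg _ (ih _ _ _ none)
        · simp only [if_neg ht]
          exact congrArg _ (ih _ _ _ none)

theorem create_initial_path_eq (movements : List String) (initial_heading : Int) :
    create_initial_path movements initial_heading = create_initial_path_alt movements initial_heading := by
  unfold create_initial_path create_initial_path_alt cipKeyA cipKeyB
  exact congrArg _ (cipLoopA_eq movements 0 0 _ none)

-- ===== VERDICT (by name: the statement is the Claim_ definition above) =====
theorem create_initial_path_spec : Claim_equal_create_initial_path := by
  intro movements initial_heading _
  exact create_initial_path_eq movements initial_heading
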